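-- pv_equiv track=rewrite | github.com/Awesome94/Algo_Python | exam.py | exam2
-- ===== SOURCE A (Python) =====
-- def exam2(v):
--     numOfQtns = 0
--     n = len(v)
--     x = 0
--     while x < n:
--         if v[x] == 0:
--             v[x] = -1
--         x += 1
--
--     for x in range(n):
--         if sum(v[:x]) > sum(v[x:]):
--             return numOfQtns
--         else:
--             numOfQtns += 1
-- ===== SOURCE B (Python) =====
-- def exam2(v):
--     # One pass with a running prefix sum; does not mutate the caller's list
--     # (A replaces zeros by -1 in place; equivalence is about the return value).
--     w = [-1 if e == 0 else e for e in v]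
--     total = sum(w)
--     left = 0
--     for i, e in enumerate(w):
--         if left > total - left:
--             return i
--         left += e
--     return None
-- ===== Notes on version B (the rewrite author's own statement) =====
-- stated objective: faster
-- what changed: Replaces the per-index recomputation of sum(v[:x]) and sum(v[x:]) by a single pass maintaining a running prefix sum against the precomputed total; B also does not mutate the input list.
import Mathlib
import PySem

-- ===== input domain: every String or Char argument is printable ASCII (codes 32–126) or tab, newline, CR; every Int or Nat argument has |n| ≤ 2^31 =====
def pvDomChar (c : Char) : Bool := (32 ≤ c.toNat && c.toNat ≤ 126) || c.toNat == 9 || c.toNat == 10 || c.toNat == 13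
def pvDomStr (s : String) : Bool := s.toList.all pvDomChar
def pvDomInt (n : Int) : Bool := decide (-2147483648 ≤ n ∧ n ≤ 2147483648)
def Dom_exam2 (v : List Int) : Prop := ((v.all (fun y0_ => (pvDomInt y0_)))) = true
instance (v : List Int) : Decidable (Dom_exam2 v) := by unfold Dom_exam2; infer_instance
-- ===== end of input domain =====

-- B replaces A's quadratic per-index slice sums by a single pass with a running prefix
-- sum (objective: faster, O(n) vs O(n^2)); A mutates its argument in place (zeros → -1),
-- B does not — the equivalence proved here is about the return value only.

-- ===== PORT A =====
-- the while loop rewriting zeros to -1 in place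
def examA_zero : List Int → List Int
  | [] => []
  | e :: t => (if e = 0 then -1 else e) :: examA_zero t

-- the for loop; numOfQtns is the counter c (incremented together with x)
def examA_go (w : List Int) (n : Nat) (x : Nat) (c : Int) : Option Int :=
  if x < n then
    if (w.take x).sum > (w.drop x).sum then some c
    else examA_go w n (x + 1) (c + 1)
  else none
termination_by n - x

def exam2 (v : List Int) : Option Int :=
  let w := examA_zero v
  examA_go w w.length 0 0

-- ===== PORT B =====
def examB_go : List Int → Int → Int → Nat → Option Int
  | [], _, _, _ => none
  | e :: t, total, left, i =>
    if left > total - left then some (i : Int) else examB_go t total (left + e) (i + 1)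

def exam2_alt (v : List Int) : Option Int :=
  let w := v.map (fun e => if e = 0 then -1 else e)
  examB_go w w.sum 0 0

-- ===== PRECONDITION & SPEC =====
def Spec_exam2 (v : List Int) (out : Option Int) : Prop := out = exam2_alt v
instance (v : List Int) (out : Option Int) : Decidable (Spec_exam2 v out) := by unfold Spec_exam2; infer_instance

-- ===== CLAIM (what is proved, stated in full; the proofs are below) =====
def Claim_equal_exam2 : Prop := ∀ (v : List Int), Dom_exam2 v → Spec_exam2 v (exam2 v)

-- ===== LEMMAS AND PROOFS =====
theorem examA_zero_eq_map (v : List Int) :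
    examA_zero v = v.map (fun e => if e = 0 then -1 else e) := by
  induction v with
  | nil => rfl
  | cons e t ih => simp [examA_zero, ih]

theorem examA_go_eq (w : List Int) (x : Nat) (hx : x ≤ w.length) :
    examA_go w w.length x ((x : Nat) : Int)
      = examB_go (w.drop x) w.sum (w.take x).sum x := by
  have hsum : (w.take x).sum + (w.drop x).sum = w.sum := by
    conv_rhs => rw [← List.take_append_drop x w]
    rw [List.sum_append]
  rcases lt_or_eq_of_le hx with h | h
  · rw [examA_go]
    have hd : w.drop x = w[x] :: w.drop (x + 1) := List.drop_eq_getElem_cons h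
    conv_rhs => rw [hd, examB_go]
    rw [if_pos h]
    by_cases hc : (w.take x).sum > (w.drop x).sum
    · have hc' : (w.take x).sum > w.sum - (w.take x).sum := by omega
      rw [if_pos hc, if_pos hc']
    · have hc' : ¬ (w.take x).sum > w.sum - (w.take x).sum := by omega
      rw [if_neg hc, if_neg hc']
      have hrec := examA_go_eq w (x + 1) h
      have htake : (w.take (x + 1)).sum = (w.take x).sum + w[x] :=
        List.sum_take_succ w x h
      push_cast at hrec
      rw [← htake, hrec]
  · subst h
    rw [examA_go]
    simp [examB_go]
termination_by w.length - x

theorem exam2_spec : Claim_equal_exam2 := by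
  intro v _
  unfold Spec_exam2 exam2 exam2_alt
  simp only [examA_zero_eq_map]
  set w := v.map (fun e => if e = 0 then -1 else e) with hw
  have h := examA_go_eq w 0 (Nat.zero_le _)
  simpa using h
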